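-- pv_equiv track=rewrite | github.com/Rekk-e/ibs_python | task_3.py | find_in_different_registers
-- ===== SOURCE A (Python) =====
-- def find_in_different_registers(words: list) -> list or None:
--     """
--     returns unique case-sensitive words in lowercase in one instance
--     """
--
--     duplicates = set()
--     words_in_lower = {}
--
--     for word in words:
--         if word in words_in_lower:
--             duplicates.add(word.lower())
--         else:
--             words_in_lower[word] = word.lower()
--
--     return list(set(words_in_lower.values()) - duplicates)
-- ===== SOURCE B (Python) =====
-- def find_in_different_registers(words: list) -> list or None:
--     """
--     returns unique case-sensitive words in lowercase in one instance
--     """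
--     groups = {}
--     for word in words:
--         groups.setdefault(word.lower(), []).append(word)
--     return [low for low, grp in groups.items() if len(grp) == len(set(grp))]
-- ===== Notes on version B (the rewrite author's own statement) =====
-- stated objective: alternative
-- what changed: Instead of A's single pass that tracks exact-word duplicates alongside a word->lowercase dict and then subtracts the duplicate set, B groups the occurrences of the words by their lowercase form into a dict of lists and keeps exactly the lowercase keys whose occurrence group contains no repeated exact form (len(grp) == len(set(grp))); no duplicate set and no set difference are ever built.
import Mathlib
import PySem

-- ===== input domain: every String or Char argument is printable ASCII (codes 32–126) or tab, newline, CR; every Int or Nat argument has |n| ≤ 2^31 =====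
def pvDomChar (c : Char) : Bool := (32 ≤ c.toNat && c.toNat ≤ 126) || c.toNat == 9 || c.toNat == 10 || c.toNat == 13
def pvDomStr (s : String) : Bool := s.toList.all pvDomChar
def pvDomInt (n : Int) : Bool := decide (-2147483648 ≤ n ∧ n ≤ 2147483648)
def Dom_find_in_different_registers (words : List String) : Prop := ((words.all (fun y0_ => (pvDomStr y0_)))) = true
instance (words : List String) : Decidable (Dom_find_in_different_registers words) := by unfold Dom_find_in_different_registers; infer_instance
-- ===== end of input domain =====

-- B replaces A's duplicate-set-and-subtract pass with a grouping of the occurrences by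
-- lowercase form followed by a per-group all-distinct test (objective: alternative).
-- Both Pythons return a list whose order comes from a set/dict; the ports agree element-for-element.

-- ===== PORT A =====
def find_in_different_registers (words : List String) : List String :=
  let st := words.foldl
    (fun (st : PySem.Set String × PySem.Dict String String) word =>
      if st.2.contains word then (PySem.Set.add st.1 (PySem.Str.lower word), st.2)
      else (st.1, st.2.insert word (PySem.Str.lower word)))
    (PySem.Set.empty, PySem.Dict.empty)
  PySem.Set.diff (PySem.Set.ofList st.2.values) st.1

-- ===== PORT B =====
def find_in_different_registers_alt (words : List String) : List String :=
  let groups := words.foldl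
    (fun (d : PySem.Dict String (List String)) word =>
      d.modify (PySem.Str.lower word) [] (fun g => g ++ [word]))
    PySem.Dict.empty
  (groups.items.filter (fun p => p.2.length == (PySem.Set.ofList p.2).length)).map (fun p => p.1)

-- ===== PRECONDITION & SPEC =====
def Spec_find_in_different_registers (words : List String) (out : List String) : Prop := out = find_in_different_registers_alt words
instance (words : List String) (out : List String) : Decidable (Spec_find_in_different_registers words out) := by unfold Spec_find_in_different_registers; infer_instance

-- ===== CLAIM (what is proved, stated in full; the proofs are below) =====
def Claim_equal_find_in_different_registers : Prop := ∀ (words : List String), Dom_find_in_different_registers words → Spec_find_in_different_registers words (find_in_different_registers words)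

-- ===== LEMMAS AND PROOFS =====
def aStepF : PySem.Set String × PySem.Dict String String → String → PySem.Set String × PySem.Dict String String :=
  fun st word =>
    if st.2.contains word then (PySem.Set.add st.1 (PySem.Str.lower word), st.2)
    else (st.1, st.2.insert word (PySem.Str.lower word))

theorem dict_contains_iff_mem_keys (d : PySem.Dict String String) (k : String) :
    d.contains k = true ↔ k ∈ d.keys := by
  simp [PySem.Dict.contains, PySem.Dict.keys, List.any_eq_true]

theorem set_add_of_not_mem {s : PySem.Set String} {x : String} (h : x ∉ s) :
    PySem.Set.add s x = s ++ [x] := by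
  simp [PySem.Set.add, h]

theorem aDict_invariant (ws : List String) (dup : PySem.Set String) (d : PySem.Dict String String)
    (h : ∀ p ∈ d.items, p.2 = PySem.Str.lower p.1) :
    (∀ p ∈ (ws.foldl aStepF (dup, d)).2.items, p.2 = PySem.Str.lower p.1) ∧
    (ws.foldl aStepF (dup, d)).2.keys = PySem.Set.update d.keys ws := by
  induction ws generalizing dup d with
  | nil => exact ⟨h, rfl⟩
  | cons w ws ih =>
    simp only [List.foldl_cons]
    by_cases hc : d.contains w = true
    · have hstep : aStepF (dup, d) w = (PySem.Set.add dup (PySem.Str.lower w), d) := by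
        simp [aStepF, hc]
      rw [hstep]
      have hk : PySem.Set.add d.keys w = d.keys :=
        PySem.Set.add_of_mem ((dict_contains_iff_mem_keys d w).mp hc)
      have := ih (PySem.Set.add dup (PySem.Str.lower w)) d h
      refine ⟨this.1, ?_⟩
      rw [this.2]
      simp only [PySem.Set.update, List.foldl_cons, hk]
    · have hcf : d.contains w = false := by simpa using hc
      have hstep : aStepF (dup, d) w = (dup, d.insert w (PySem.Str.lower w)) := by
        simp [aStepF, hcf]
      rw [hstep]
      have hitems : (d.insert w (PySem.Str.lower w)).items = d.items ++ [(w, PySem.Str.lower w)] := by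
        simp [PySem.Dict.insert, hcf]
      have h' : ∀ p ∈ (d.insert w (PySem.Str.lower w)).items, p.2 = PySem.Str.lower p.1 := by
        intro p hp
        rw [hitems] at hp
        rcases List.mem_append.mp hp with hp | hp
        · exact h p hp
        · simp at hp; rw [hp]
      have := ih dup _ h'
      refine ⟨this.1, ?_⟩
      rw [this.2, PySem.Dict.keys_insert_of_not_contains d _ hcf]
      have hkm : w ∉ d.keys := fun hm => by
        rw [(dict_contains_iff_mem_keys d w).mpr hm] at hcf; cases hcf
      simp only [PySem.Set.update, List.foldl_cons, set_add_of_not_mem hkm]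

theorem aDup_mem (ws : List String) (dup : PySem.Set String) (d : PySem.Dict String String) (x : String) :
    x ∈ (ws.foldl aStepF (dup, d)).1 ↔
      x ∈ dup ∨ ∃ w ∈ ws, (d.contains w = true ∨ 2 ≤ ws.count w) ∧ PySem.Str.lower w = x := by
  induction ws generalizing dup d with
  | nil => simp
  | cons w ws ih =>
    simp only [List.foldl_cons]
    by_cases hc : d.contains w = true
    · have hstep : aStepF (dup, d) w = (PySem.Set.add dup (PySem.Str.lower w), d) := by
        simp [aStepF, hc]
      rw [hstep, ih, PySem.Set.mem_add]
      constructor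
      · rintro ((hd | hx) | ⟨w', hw', hcond, hl⟩)
        · exact Or.inl hd
        · exact Or.inr ⟨w, List.mem_cons_self, Or.inl hc, hx.symm⟩
        · refine Or.inr ⟨w', List.mem_cons_of_mem _ hw', ?_, hl⟩
          rcases hcond with hcc | hcnt
          · exact Or.inl hcc
          · right; simp only [List.count_cons]; split <;> omega
      · rintro (hd | ⟨w', hw', hcond, hl⟩)
        · exact Or.inl (Or.inl hd)
        · rcases List.mem_cons.mp hw' with rfl | hw''
          · exact Or.inl (Or.inr hl.symm)
          · by_cases hww : w' = w
            · subst hww; exact Or.inl (Or.inr hl.symm)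
            · refine Or.inr ⟨w', hw'', ?_, hl⟩
              rcases hcond with hcc | hcnt
              · exact Or.inl hcc
              · right
                have hne : ¬ (w = w') := fun e => hww e.symm
                simp only [List.count_cons] at hcnt
                simp [hne] at hcnt; omega
    · have hcf : d.contains w = false := by simpa using hc
      have hstep : aStepF (dup, d) w = (dup, d.insert w (PySem.Str.lower w)) := by
        simp [aStepF, hcf]
      rw [hstep, ih]
      have hkins : ∀ w' : String, (d.insert w (PySem.Str.lower w)).contains w' = true ↔ w' = w ∨ d.contains w' = true := by
        intro w'
        rw [dict_contains_iff_mem_keys, PySem.Dict.mem_keys_insert]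
        constructor
        · rintro (rfl | hm)
          · exact Or.inl rfl
          · exact Or.inr ((dict_contains_iff_mem_keys d w').mpr hm)
        · rintro (rfl | hm)
          · exact Or.inl rfl
          · exact Or.inr ((dict_contains_iff_mem_keys d w').mp hm)
      constructor
      · rintro (hd | ⟨w', hw', hcond, hl⟩)
        · exact Or.inl hd
        · by_cases hww : w' = w
          · subst hww
            refine Or.inr ⟨w', List.mem_cons_self, Or.inr ?_, hl⟩
            have : 1 ≤ ws.count w' := List.count_pos_iff.mpr hw'
            simp only [List.count_cons]; split <;> simp_all
          · refine Or.inr ⟨w', List.mem_cons_of_mem _ hw', ?_, hl⟩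
            rcases hcond with hcc | hcnt
            · rcases (hkins w').mp hcc with rfl | hd'
              · exact absurd rfl hww
              · exact Or.inl hd'
            · right; simp only [List.count_cons]; split <;> omega
      · rintro (hd | ⟨w', hw', hcond, hl⟩)
        · exact Or.inl hd
        · rcases List.mem_cons.mp hw' with rfl | hw''
          · rcases hcond with hcc | hcnt
            · rw [hcc] at hcf; cases hcf
            · simp only [List.count_cons, BEq.rfl, if_true] at hcnt
              have hcnt1 : 1 <= ws.count w' := by omega
              have hmem : w' ∈ ws := List.count_pos_iff.mp hcnt1
              exact Or.inr ⟨w', hmem, Or.inl ((hkins w').mpr (Or.inl rfl)), hl⟩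
          · by_cases hww : w' = w
            · subst hww
              have : 1 ≤ ws.count w' := List.count_pos_iff.mpr hw''
              exact Or.inr ⟨w', hw'', Or.inl ((hkins w').mpr (Or.inl rfl)), hl⟩
            · refine Or.inr ⟨w', hw'', ?_, hl⟩
              rcases hcond with hcc | hcnt
              · exact Or.inl ((hkins w').mpr (Or.inr hcc))
              · right
                have hne : ¬ (w = w') := fun e => hww e.symm
                simp only [List.count_cons] at hcnt
                simp [hne] at hcnt; omega

-- dedup commutes with a map: set of (f of the distinct elements) = set of (f of all elements)
theorem ofList_map_ofList (f : String → String) (l : List String) :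
    PySem.Set.ofList ((PySem.Set.ofList l).map f) = PySem.Set.ofList (l.map f) := by
  induction l using List.reverseRecOn with
  | nil => rfl
  | append_singleton l x ih =>
    rw [PySem.Set.ofList_append_singleton, List.map_append, List.map_singleton,
        PySem.Set.ofList_append_singleton]
    by_cases hx : x ∈ PySem.Set.ofList l
    · rw [PySem.Set.add_of_mem hx, ih, PySem.Set.add_of_mem]
      rw [PySem.Set.mem_ofList]
      exact List.mem_map_of_mem ((PySem.Set.mem_ofList l x).mp hx)
    · rw [set_add_of_not_mem hx, List.map_append, List.map_singleton,
          PySem.Set.ofList_append_singleton, ih]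

-- a list has as many distinct elements as elements iff it has no repetition
theorem length_ofList_eq_iff_nodup (l : List String) :
    (PySem.Set.ofList l).length = l.length ↔ l.Nodup := by
  constructor
  · intro h
    have hsub : PySem.Set.ofList l ⊆ l := fun x hx => (PySem.Set.mem_ofList l x).mp hx
    have hperm := (PySem.Set.nodup_ofList l).subperm hsub |>.perm_of_length_le (le_of_eq h.symm)
    exact hperm.nodup (PySem.Set.nodup_ofList l)
  · intro h
    rw [PySem.Set.ofList_eq_self_of_nodup l h]

-- the occurrence group of x has a repetition iff some word lowering to x occurs twice
theorem nodup_group_iff (words : List String) (x : String) :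
    (words.filter (fun w => PySem.Str.lower w == x)).Nodup ↔
      ¬ ∃ w ∈ words, 2 ≤ words.count w ∧ PySem.Str.lower w = x := by
  rw [List.nodup_iff_count_le_one]
  constructor
  · intro h ⟨w, hw, hc, hl⟩
    have := h w
    rw [List.count_filter (by simp [hl])] at this
    omega
  · intro h a
    by_cases ha : PySem.Str.lower a = x
    · rw [List.count_filter (by simp [ha])]
      by_contra hgt
      push Not at hgt
      exact h ⟨a, List.count_pos_iff.mp (by omega), by omega, ha⟩
    · have : ∀ b ∈ words.filter (fun w => PySem.Str.lower w == x), b ≠ a := by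
        intro b hb
        have := List.of_mem_filter hb
        intro rfl_eq; subst rfl_eq
        exact ha (by simpa using this)
      rw [List.count_eq_zero.mpr (fun hmem => (this a hmem) rfl)]
      omega

def bStepF : PySem.Dict String (List String) → String → PySem.Dict String (List String) :=
  fun d word => d.modify (PySem.Str.lower word) [] (fun g => g ++ [word])

theorem bGroups_getD (words : List String) (x : String) :
    (words.foldl bStepF PySem.Dict.empty).getD x [] = words.filter (fun w => PySem.Str.lower w == x) := by
  have hmap : words.foldl bStepF PySem.Dict.empty
      = (words.map (fun w => (PySem.Str.lower w, w))).foldl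
          (fun (d : PySem.Dict String (List String)) p => d.modify p.1 [] (fun g => g ++ [p.2]))
          PySem.Dict.empty := by
    rw [List.foldl_map]
    rfl
  rw [hmap, PySem.Dict.getD_foldl_modify_append]
  rw [List.filter_map]
  simp [List.map_map, Function.comp_def]

theorem bGroups_keys (words : List String) :
    (words.foldl bStepF PySem.Dict.empty).keys = PySem.Set.ofList (words.map PySem.Str.lower) := by
  have := PySem.Dict.keys_foldl_modify_key words PySem.Str.lower []
      (fun _ w => (fun g => g ++ [w])) PySem.Dict.empty
  simpa [bStepF, PySem.Dict.keys_empty, PySem.Set.update_nil_left] using this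

theorem bGroups_nodup_keys (words : List String) :
    (words.foldl bStepF PySem.Dict.empty).keys.Nodup := by
  have := PySem.Dict.nodup_keys_foldl_modify_key words PySem.Str.lower []
      (fun _ w => (fun g => g ++ [w])) PySem.Dict.empty
  simpa [bStepF, PySem.Dict.keys_empty] using this (by simp [PySem.Dict.keys_empty])

-- ===== VERDICT (by name: the statement is the Claim_ definition above) =====
theorem find_in_different_registers_spec : Claim_equal_find_in_different_registers := by
  intro words _
  unfold Spec_find_in_different_registers find_in_different_registers find_in_different_registers_alt
  have hstepf : (fun (st : PySem.Set String × PySem.Dict String String) word =>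
      if st.2.contains word then (PySem.Set.add st.1 (PySem.Str.lower word), st.2)
      else (st.1, st.2.insert word (PySem.Str.lower word))) = aStepF := rfl
  have hstepg : (fun (d : PySem.Dict String (List String)) word =>
      d.modify (PySem.Str.lower word) [] (fun g => g ++ [word])) = bStepF := rfl
  rw [hstepf, hstepg]
  -- A side: values of A's dict = lowered distinct words, in first-occurrence order
  have hinv := aDict_invariant words PySem.Set.empty PySem.Dict.empty (by intro p hp; simp [PySem.Dict.empty] at hp)
  have hvals : (words.foldl aStepF (PySem.Set.empty, PySem.Dict.empty)).2.values
      = (words.foldl aStepF (PySem.Set.empty, PySem.Dict.empty)).2.keys.map PySem.Str.lower := by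
    simp only [PySem.Dict.values, PySem.Dict.keys, List.map_map]
    exact List.map_congr_left (fun p hp => hinv.1 p hp)
  have hkeysA : (words.foldl aStepF (PySem.Set.empty, PySem.Dict.empty)).2.keys = PySem.Set.ofList words := hinv.2
  show PySem.Set.diff (PySem.Set.ofList (words.foldl aStepF (PySem.Set.empty, PySem.Dict.empty)).2.values)
        (words.foldl aStepF (PySem.Set.empty, PySem.Dict.empty)).1
      = ((words.foldl bStepF PySem.Dict.empty).items.filter
          (fun p => p.2.length == (PySem.Set.ofList p.2).length)).map (fun p => p.1)
  rw [hvals, hkeysA, ofList_map_ofList]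
  -- B side: items = keys paired with their occurrence groups
  rw [PySem.Dict.items_eq_map_keys _ (bGroups_nodup_keys words) [], List.filter_map, List.map_map]
  rw [bGroups_keys]
  -- both sides are now filters of the same deduped lowered list; compare predicates pointwise
  unfold PySem.Set.diff
  have hmapid : (fun (p : String × List String) => p.1) ∘ (fun k => (k, (words.foldl bStepF PySem.Dict.empty).getD k [])) = id := rfl
  rw [show ((PySem.Set.ofList (words.map PySem.Str.lower)).filter
        ((fun p => p.2.length == (PySem.Set.ofList p.2).length) ∘
          (fun k => (k, (words.foldl bStepF PySem.Dict.empty).getD k [])))).map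
        ((fun (p : String × List String) => p.1) ∘ (fun k => (k, (words.foldl bStepF PySem.Dict.empty).getD k []))) =
      ((PySem.Set.ofList (words.map PySem.Str.lower)).filter
        ((fun p => p.2.length == (PySem.Set.ofList p.2).length) ∘
          (fun k => (k, (words.foldl bStepF PySem.Dict.empty).getD k [])))).map id from rfl]
  rw [List.map_id]
  apply List.filter_congr
  intro x _
  simp only [Function.comp_apply, bGroups_getD]
  -- left predicate: x not recorded as a duplicate; right: the group of x has no repetition
  have hdup : (x ∈ (words.foldl aStepF (PySem.Set.empty, PySem.Dict.empty)).1) ↔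
      ∃ w ∈ words, 2 ≤ words.count w ∧ PySem.Str.lower w = x := by
    rw [aDup_mem]
    constructor
    · rintro (hx | ⟨w, hw, hcond, hl⟩)
      · simp [PySem.Set.empty] at hx
      · rcases hcond with hcc | hcnt
        · simp [PySem.Dict.contains, PySem.Dict.empty] at hcc
        · exact ⟨w, hw, hcnt, hl⟩
    · rintro ⟨w, hw, hc, hl⟩
      exact Or.inr ⟨w, hw, Or.inr hc, hl⟩
  rw [Bool.eq_iff_iff]
  simp only [beq_iff_eq, Bool.not_eq_eq_eq_not, Bool.not_true]
  rw [show ((words.foldl aStepF (PySem.Set.empty, PySem.Dict.empty)).1.contains x = false) ↔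
      (x ∉ (words.foldl aStepF (PySem.Set.empty, PySem.Dict.empty)).1) by
    simp [PySem.Set.contains]]
  rw [hdup]
  rw [show ((words.filter (fun w => PySem.Str.lower w == x)).length =
      (PySem.Set.ofList (words.filter (fun w => PySem.Str.lower w == x))).length) ↔
      (PySem.Set.ofList (words.filter (fun w => PySem.Str.lower w == x))).length =
      (words.filter (fun w => PySem.Str.lower w == x)).length from eq_comm]
  rw [length_ofList_eq_iff_nodup]
  exact (nodup_group_iff words x).symm
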